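-- pv_equiv track=rewrite | github.com/Vashaar/srt-translation-engine | translator/pipeline.py | _window_ranges
-- ===== SOURCE A (Python) =====
-- def _window_ranges(total_blocks: int, batch_size: int) -> list[tuple[int, int]]:
--     if total_blocks <= 0:
--         return []
--     sizes: list[int] = []
--     remaining = total_blocks
--     while remaining > 0:
--         size = min(batch_size, remaining)
--         if remaining > batch_size and remaining - size < 5:
--             size = min(15, remaining)
--         sizes.append(size)
--         remaining -= size
--
--     ranges: list[tuple[int, int]] = []
--     start = 0
--     for size in sizes:
--         end = start + size
--         ranges.append((start, end))
--         start = end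
--     return ranges
-- ===== SOURCE B (Python) =====
-- def _window_ranges(total_blocks: int, batch_size: int) -> list[tuple[int, int]]:
--     if total_blocks <= 0:
--         return []
--     # closed-form count of full batch_size-sized windows before the tail adjustment kicks in
--     if batch_size >= 1 and total_blocks >= batch_size + 5:
--         full = (total_blocks - batch_size - 5) // batch_size + 1
--     else:
--         full = 0
--     ranges = [(i * batch_size, (i + 1) * batch_size) for i in range(full)]
--     start = full * batch_size
--     rem = total_blocks - start
--     if rem <= batch_size or rem <= 15:
--         ranges.append((start, total_blocks))
--     else:
--         ranges.append((start, start + 15))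
--         ranges.append((start + 15, total_blocks))
--     return ranges
-- ===== Notes on version B (the rewrite author's own statement) =====
-- stated objective: alternative
-- what changed: B computes the number of full-size windows in closed form with integer division and emits them by a range comprehension, then appends the one or two tail windows directly, instead of A's simulation loop producing a sizes list followed by a second conversion pass.
import Mathlib
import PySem

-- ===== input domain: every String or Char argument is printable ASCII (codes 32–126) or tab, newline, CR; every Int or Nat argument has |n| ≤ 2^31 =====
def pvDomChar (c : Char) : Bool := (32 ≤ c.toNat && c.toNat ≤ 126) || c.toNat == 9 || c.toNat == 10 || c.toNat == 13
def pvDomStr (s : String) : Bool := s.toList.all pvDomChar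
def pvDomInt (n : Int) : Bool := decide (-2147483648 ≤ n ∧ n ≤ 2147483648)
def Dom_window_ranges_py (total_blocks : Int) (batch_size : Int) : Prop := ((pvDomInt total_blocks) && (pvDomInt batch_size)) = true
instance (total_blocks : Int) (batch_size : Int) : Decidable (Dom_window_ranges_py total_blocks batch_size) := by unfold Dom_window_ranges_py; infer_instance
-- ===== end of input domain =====

-- B replaces A's size-simulation loop + conversion pass by a closed-form count of full
-- windows (integer division) plus an explicit one-or-two-window tail; return values proved equal on Pre_.

-- ===== PORT A =====
-- A's while-loop over `remaining`, with fuel total_blocks.toNat (each iteration inside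
-- Pre_ shrinks remaining by at least 1, so the fuel is never exhausted there).
def aSizes (batch_size : Int) : Nat → Int → List Int
  | 0, _ => []
  | fuel + 1, remaining =>
    if remaining > 0 then
      let size := min batch_size remaining
      let size := if remaining > batch_size ∧ remaining - size < 5 then min 15 remaining else size
      size :: aSizes batch_size fuel (remaining - size)
    else []

def window_ranges_py (total_blocks : Int) (batch_size : Int) : List (Int × Int) :=
  if total_blocks ≤ 0 then []
  else
    let sizes := aSizes batch_size total_blocks.toNat total_blocks
    (sizes.foldl (fun (acc : List (Int × Int) × Int) size =>
      (acc.1 ++ [(acc.2, acc.2 + size)], acc.2 + size)) ([], 0)).1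

-- ===== PORT B =====
def window_ranges_py_alt (total_blocks : Int) (batch_size : Int) : List (Int × Int) :=
  if total_blocks ≤ 0 then []
  else
    let full : Int :=
      if 1 ≤ batch_size ∧ batch_size + 5 ≤ total_blocks then
        PySem.Int.floordiv (total_blocks - batch_size - 5) batch_size + 1
      else 0
    let ranges := (PySem.List.pyRange 0 full 1).map
      (fun i => (i * batch_size, (i + 1) * batch_size))
    let start := full * batch_size
    let rem := total_blocks - start
    if rem ≤ batch_size ∨ rem ≤ 15 then ranges ++ [(start, total_blocks)]
    else ranges ++ [(start, start + 15), (start + 15, total_blocks)]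

-- ===== PRECONDITION & SPEC =====
-- Pre_ excludes exactly the inputs on which A's while-loop never terminates
-- (batch_size ≤ 0 with total_blocks ≥ batch_size + 5): A returns on all other inputs.
def Pre_window_ranges_py (total_blocks : Int) (batch_size : Int) : Prop :=
  total_blocks ≤ 0 ∨ 1 ≤ batch_size ∨ total_blocks < batch_size + 5
instance (total_blocks : Int) (batch_size : Int) : Decidable (Pre_window_ranges_py total_blocks batch_size) := by unfold Pre_window_ranges_py; infer_instance
def pvWitness_window_ranges_py : Int × Int := (10, 3)

def Spec_window_ranges_py (total_blocks : Int) (batch_size : Int) (out : List (Int × Int)) : Prop := out = window_ranges_py_alt total_blocks batch_size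
instance (total_blocks : Int) (batch_size : Int) (out : List (Int × Int)) : Decidable (Spec_window_ranges_py total_blocks batch_size out) := by unfold Spec_window_ranges_py; infer_instance

-- ===== CLAIM (what is proved, stated in full; the proofs are below) =====
def Claim_equal_window_ranges_py : Prop := ∀ (total_blocks : Int) (batch_size : Int), Dom_window_ranges_py total_blocks batch_size → Pre_window_ranges_py total_blocks batch_size → Spec_window_ranges_py total_blocks batch_size (window_ranges_py total_blocks batch_size)

-- ===== LEMMAS AND PROOFS =====

-- ranges built from a sizes list starting at a given cursor (the meaning of A's second pass)
def rangesFrom (start : Int) : List Int → List (Int × Int)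
  | [] => []
  | s :: rest => (start, start + s) :: rangesFrom (start + s) rest

theorem foldl_eq_rangesFrom (sizes : List Int) (acc : List (Int × Int)) (start : Int) :
    (sizes.foldl (fun (acc : List (Int × Int) × Int) size =>
      (acc.1 ++ [(acc.2, acc.2 + size)], acc.2 + size)) (acc, start)).1
      = acc ++ rangesFrom start sizes := by
  induction sizes generalizing acc start with
  | nil => simp [rangesFrom]
  | cons s rest ih => simp [List.foldl, rangesFrom, ih]

theorem aSizes_nonpos (batch_size : Int) (fuel : Nat) (r : Int) (h : ¬ r > 0) :
    aSizes batch_size fuel r = [] := by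
  cases fuel <;> simp [aSizes, h]

-- B's closed form for remaining r at cursor `start`
def bFull (batch_size r : Int) : Int :=
  if 1 ≤ batch_size ∧ batch_size + 5 ≤ r then
    PySem.Int.floordiv (r - batch_size - 5) batch_size + 1
  else 0

def bGen (batch_size start r : Int) : List (Int × Int) :=
  (PySem.List.pyRange 0 (bFull batch_size r) 1).map
      (fun i => (start + i * batch_size, start + (i + 1) * batch_size))
    ++ (if r - bFull batch_size r * batch_size ≤ batch_size
          ∨ r - bFull batch_size r * batch_size ≤ 15 then
          [(start + bFull batch_size r * batch_size, start + r)]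
        else
          [(start + bFull batch_size r * batch_size,
            start + bFull batch_size r * batch_size + 15),
           (start + bFull batch_size r * batch_size + 15, start + r)])

theorem bFull_rec (batch_size r : Int) (hb : 1 ≤ batch_size) (hbig : batch_size + 5 ≤ r) :
    bFull batch_size r = bFull batch_size (r - batch_size) + 1 := by
  unfold bFull
  rw [if_pos ⟨hb, hbig⟩]
  by_cases hbig2 : batch_size + 5 ≤ r - batch_size
  · rw [if_pos ⟨hb, hbig2⟩]
    have h1 : PySem.Int.floordiv (r - batch_size - 5) batch_size
        = PySem.Int.floordiv (r - batch_size - batch_size - 5) batch_size + 1 := by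
      rw [PySem.Int.floordiv_eq_ediv_of_pos (by omega),
          PySem.Int.floordiv_eq_ediv_of_pos (by omega)]
      have h : r - batch_size - 5 = (r - batch_size - batch_size - 5) + 1 * batch_size := by ring
      rw [h, Int.add_mul_ediv_right _ _ (by omega : batch_size ≠ 0)]
    omega
  · rw [if_neg (by omega)]
    have h0 : PySem.Int.floordiv (r - batch_size - 5) batch_size = 0 := by
      rw [PySem.Int.floordiv_eq_ediv_of_pos (by omega)]
      exact Int.ediv_eq_zero_of_lt (by omega) (by omega)
    omega

theorem bFull_nonneg (batch_size r : Int) : 0 ≤ bFull batch_size r := by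
  unfold bFull
  split
  · next h =>
    rw [PySem.Int.floordiv_eq_ediv_of_pos (by omega)]
    have := Int.ediv_nonneg (a := r - batch_size - 5) (b := batch_size) (by omega) (by omega)
    omega
  · omega

theorem bFull_tail (batch_size r : Int) (h : ¬ (1 ≤ batch_size ∧ batch_size + 5 ≤ r)) :
    bFull batch_size r = 0 := by
  unfold bFull; rw [if_neg h]

theorem pyRange_map_succ (n : Int) (f : Int → Int × Int) (hn : 0 ≤ n) :
    (PySem.List.pyRange 0 (n + 1) 1).map f
      = f 0 :: (PySem.List.pyRange 0 n 1).map (fun i => f (i + 1)) := by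
  rw [PySem.List.pyRange_one_cons (by omega)]
  simp only [List.map_cons, List.cons.injEq, true_and]
  rw [PySem.List.pyRange_one (0+1) (n+1), PySem.List.pyRange_one 0 n]
  simp only [List.map_map]
  have hlen : (n + 1 - (0 + 1)).toNat = (n - 0).toNat := by omega
  rw [hlen]
  apply List.map_congr_left
  intro k _
  simp only [Function.comp]
  congr 1
  ring

-- main induction: A's loop from remaining r at cursor start yields B's closed form
theorem main_lemma (batch_size : Int) (fuel : Nat) :
    ∀ r start : Int, 1 ≤ batch_size → 0 < r → r ≤ (fuel : Int) →
      rangesFrom start (aSizes batch_size fuel r) = bGen batch_size start r := by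
  induction fuel with
  | zero => intro r start _ hr hle; exfalso; omega
  | succ f ih =>
    intro r start hb hr hle
    by_cases hbig : batch_size + 5 ≤ r
    · -- full step: size = batch_size
      have hmin : min batch_size r = batch_size := min_eq_left (by omega)
      have hstep : aSizes batch_size (f + 1) r
          = batch_size :: aSizes batch_size f (r - batch_size) := by
        simp only [aSizes, hmin]
        rw [if_pos hr, if_neg (show ¬ (r > batch_size ∧ r - batch_size < 5) by omega)]
      rw [hstep]
      simp only [rangesFrom]
      rw [ih (r - batch_size) (start + batch_size) hb (by omega) (by omega)]
      unfold bGen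
      rw [bFull_rec batch_size r hb hbig]
      set k := bFull batch_size (r - batch_size) with hk
      have hk0 : 0 ≤ k := bFull_nonneg _ _
      rw [pyRange_map_succ k _ hk0]
      have e0 : r - (k + 1) * batch_size = r - batch_size - k * batch_size := by ring
      have e1 : start + (k + 1) * batch_size = start + batch_size + k * batch_size := by ring
      have e2 : start + r = start + batch_size + (r - batch_size) := by ring
      rw [e0, e1, e2]
      simp only [List.cons_append]
      congr 1
      · norm_num
      · congr 1
        apply List.map_congr_left
        intro i _
        simp only [Prod.mk.injEq]
        exact ⟨by ring, by ring⟩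
    · -- tail: r < batch_size + 5
      have hf : bFull batch_size r = 0 := bFull_tail _ _ (by omega)
      unfold bGen
      rw [hf]
      simp only [PySem.List.pyRange_zero, zero_mul, add_zero, sub_zero]
      by_cases h1 : r ≤ batch_size
      · -- size = r, done in one step
        have hmin : min batch_size r = r := min_eq_right h1
        have hstep : aSizes batch_size (f + 1) r = r :: aSizes batch_size f (r - r) := by
          simp only [aSizes, hmin]
          rw [if_pos hr, if_neg (show ¬ (r > batch_size ∧ r - r < 5) by omega)]
        rw [hstep, sub_self, aSizes_nonpos _ _ _ (by omega)]
        rw [if_pos (Or.inl h1)]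
        simp [rangesFrom]
      · -- batch_size < r < batch_size + 5 : adjusted size = min 15 r
        have hmin : min batch_size r = batch_size := min_eq_left (by omega)
        by_cases h15 : r ≤ 15
        · have hstep : aSizes batch_size (f + 1) r = r :: aSizes batch_size f (r - r) := by
            simp only [aSizes, hmin, min_eq_right h15]
            rw [if_pos hr, if_pos (show r > batch_size ∧ r - batch_size < 5 by omega)]
          rw [hstep, sub_self, aSizes_nonpos _ _ _ (by omega)]
          rw [if_pos (Or.inr h15)]
          simp [rangesFrom]
        · -- r > 15 : emit 15 then r - 15 (which is < batch_size)
          have hstep : aSizes batch_size (f + 1) r = 15 :: aSizes batch_size f (r - 15) := by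
            simp only [aSizes, hmin, min_eq_left (show (15:Int) ≤ r by omega)]
            rw [if_pos hr, if_pos (show r > batch_size ∧ r - batch_size < 5 by omega)]
          obtain ⟨f', rfl⟩ : ∃ f', f = f' + 1 := ⟨f - 1, by omega⟩
          have hmin2 : min batch_size (r - 15) = r - 15 := min_eq_right (by omega)
          have hstep2 : aSizes batch_size (f' + 1) (r - 15)
              = (r - 15) :: aSizes batch_size f' (r - 15 - (r - 15)) := by
            simp only [aSizes, hmin2]
            rw [if_pos (show r - 15 > 0 by omega),
              if_neg (show ¬ (r - 15 > batch_size ∧ r - 15 - (r - 15) < 5) by omega)]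
          rw [hstep, hstep2, sub_self, aSizes_nonpos _ _ _ (by omega)]
          rw [if_neg (by omega)]
          simp [rangesFrom, show start + 15 + (r - 15) = start + r from by ring]

-- B's port equals bGen at cursor 0 (for positive total_blocks)
theorem alt_eq_bGen (total_blocks batch_size : Int) (ht : ¬ total_blocks ≤ 0) :
    window_ranges_py_alt total_blocks batch_size = bGen batch_size 0 total_blocks := by
  unfold window_ranges_py_alt bGen bFull
  rw [if_neg ht]
  simp only [zero_add]
  split_ifs <;> rfl

-- degenerate terminating case: batch_size ≤ 0 (Pre_ forces total_blocks < batch_size + 5)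
theorem nonpos_case (total_blocks batch_size : Int) (hb : ¬ 1 ≤ batch_size)
    (ht : 0 < total_blocks) (hlt : total_blocks < batch_size + 5) :
    window_ranges_py total_blocks batch_size = window_ranges_py_alt total_blocks batch_size := by
  unfold window_ranges_py window_ranges_py_alt
  rw [if_neg (by omega), if_neg (by omega)]
  have hcond : total_blocks > batch_size ∧ total_blocks - min batch_size total_blocks < 5 := by
    rw [min_eq_left (by omega : batch_size ≤ total_blocks)]; omega
  obtain ⟨k, hk⟩ : ∃ k, total_blocks.toNat = k + 1 := ⟨total_blocks.toNat - 1, by omega⟩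
  have hstep : aSizes batch_size total_blocks.toNat total_blocks
      = total_blocks :: aSizes batch_size k 0 := by
    rw [hk]
    simp only [aSizes, if_pos (by omega : total_blocks > 0), if_pos hcond,
      min_eq_right (by omega : total_blocks ≤ (15:Int)), sub_self]
  rw [hstep, aSizes_nonpos _ _ _ (by omega)]
  rw [if_neg (by omega : ¬ (1 ≤ batch_size ∧ batch_size + 5 ≤ total_blocks))]
  rw [if_pos (by omega)]
  simp

-- ===== VERDICT (by name: the statement is the Claim_ definition above) =====
theorem window_ranges_py_spec : Claim_equal_window_ranges_py := by
  intro total_blocks batch_size _ hpre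
  unfold Spec_window_ranges_py
  by_cases ht : total_blocks ≤ 0
  · unfold window_ranges_py window_ranges_py_alt
    rw [if_pos ht, if_pos ht]
  · by_cases hb : 1 ≤ batch_size
    · have h := main_lemma batch_size total_blocks.toNat total_blocks 0 hb (by omega) (by omega)
      unfold window_ranges_py
      rw [if_neg ht]
      rw [foldl_eq_rangesFrom, List.nil_append, h, alt_eq_bGen _ _ ht]
    · exact nonpos_case total_blocks batch_size hb (by omega)
        (by rcases hpre with h|h|h <;> omega)
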